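-- pv_equiv track=rewrite | github.com/alexanderjasper/adventofcode | 2022/5/solution.py | get_crates_in_line
-- ===== SOURCE A (Python) =====
-- def get_crates_in_line(line, number_of_stacks):
--     crates = ''
--     for i in range(number_of_stacks):
--         if len(line) > 1+4*i:
--             crates += line[1+4*i]
--         else:
--             crates += ' '
--     return crates.replace(' ', '-')
-- ===== SOURCE B (Python) =====
-- def get_crates_in_line(line, number_of_stacks):
--     s = line[1::4]
--     return s[:number_of_stacks].ljust(number_of_stacks, ' ').replace(' ', '-')
-- ===== Notes on version B (the rewrite author's own statement) =====
-- stated objective: idiomatic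
-- what changed: Replaces the indexed bounds-checking loop with a one-shot stride slice line[1::4], truncation to number_of_stacks, ljust padding and the same replace.
-- outside the precondition, e.g. on get_crates_in_line('[A] [B]', -1): A returns '', B returns 'A'
import Mathlib
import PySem

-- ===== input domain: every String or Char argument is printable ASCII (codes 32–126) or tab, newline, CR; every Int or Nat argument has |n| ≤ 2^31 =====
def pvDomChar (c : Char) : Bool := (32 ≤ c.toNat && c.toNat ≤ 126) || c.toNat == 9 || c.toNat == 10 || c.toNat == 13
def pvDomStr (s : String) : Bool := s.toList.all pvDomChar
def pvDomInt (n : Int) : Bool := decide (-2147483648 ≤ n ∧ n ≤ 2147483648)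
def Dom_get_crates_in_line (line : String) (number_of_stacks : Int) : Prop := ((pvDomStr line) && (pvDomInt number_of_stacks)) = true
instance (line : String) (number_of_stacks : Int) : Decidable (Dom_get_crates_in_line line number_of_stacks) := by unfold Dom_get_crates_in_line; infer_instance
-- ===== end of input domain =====

-- B replaces A's per-index bounds-checking loop by a stride-slice line[1::4], truncate-to-n,
-- pad-with-spaces pipeline followed by the same replace (idiomatic; measured faster at large sizes).


-- ===== PORT A =====
def get_crates_in_line (line : String) (number_of_stacks : Int) : String :=
  -- crates = ''; for i in range(number_of_stacks): … ; return crates.replace(' ', '-')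
  let crates : List Char :=
    (PySem.List.pyRange 0 number_of_stacks).foldl (fun crates i =>
      if (PySem.Str.len line) > 1 + 4 * i then
        -- line[1+4*i]: the guard guarantees the index is in range, so getD never pads
        crates ++ [(PySem.Str.pyGet? line (1 + 4 * i)).getD ' ']
      else
        crates ++ [' ']) []
  PySem.Str.replace (String.ofList crates) " " "-"

-- ===== PORT B =====
def get_crates_in_line_alt (line : String) (number_of_stacks : Int) : String :=
  -- s = line[1::4]  (step 4 ≠ 0, so slice? always returns some)
  let s : List Char := (PySem.List.slice? line.toList (some 1) none 4).getD []
  -- s[:number_of_stacks]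
  let t : List Char := PySem.List.slice s none (some number_of_stacks)
  -- .ljust(number_of_stacks, ' '): ported by hand — exact: pad on the right to the target width
  let padded : List Char := t ++ List.replicate (number_of_stacks.toNat - t.length) ' '
  -- .replace(' ', '-')
  String.ofList (PySem.Chars.replace padded [' '] ['-'])

-- ===== PRECONDITION & SPEC =====
-- Pre_ excludes only the negative number_of_stacks on which the stride slice line[1::4] still has
-- more than -number_of_stacks characters: there A returns '' (its range is empty) while B's negative
-- truncation s[:number_of_stacks] keeps characters; on every other input (all nonnegative counts, and
-- negative counts with a short line) both return the same value and the input is admitted.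
def Pre_get_crates_in_line (line : String) (number_of_stacks : Int) : Prop :=
  0 ≤ number_of_stacks ∨ ((line.toList.length : Int) + 2) / 4 ≤ -number_of_stacks
instance (line : String) (number_of_stacks : Int) : Decidable (Pre_get_crates_in_line line number_of_stacks) := by unfold Pre_get_crates_in_line; infer_instance

def pvWitness_get_crates_in_line : String × Int := ("[A] [B]", 3)

def Spec_get_crates_in_line (line : String) (number_of_stacks : Int) (out : String) : Prop := out = get_crates_in_line_alt line number_of_stacks
instance (line : String) (number_of_stacks : Int) (out : String) : Decidable (Spec_get_crates_in_line line number_of_stacks out) := by unfold Spec_get_crates_in_line; infer_instance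

-- ===== CLAIM (what is proved, stated in full; the proofs are below) =====
def Claim_equal_get_crates_in_line : Prop := ∀ (line : String) (number_of_stacks : Int), Dom_get_crates_in_line line number_of_stacks → Pre_get_crates_in_line line number_of_stacks → Spec_get_crates_in_line line number_of_stacks (get_crates_in_line line number_of_stacks)

-- ===== LEMMAS AND PROOFS =====

-- line[1::4] is the characters at indices 1, 5, 9, …; there are (len+2)/4 of them.
lemma strided_eq (cs : List Char) :
    (PySem.List.slice? cs (some 1) none 4).getD [] =
      (List.range ((cs.length + 2) / 4)).map (fun k => cs.getD (1 + 4 * k) ' ') := by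
  simp only [PySem.List.slice?, PySem.List.sliceIndices]
  norm_num
  rcases Nat.lt_or_ge 1 cs.length with h | h
  · have hmin : min 1 (cs.length : Int) = 1 := by omega
    have hcnt : (((cs.length : Int) - min 1 (cs.length : Int) + 4 - 1) / 4).toNat = (cs.length + 2) / 4 := by
      rw [hmin]; omega
    rw [if_pos h, hcnt, ← List.filterMap_eq_map]
    apply List.filterMap_congr
    intro x hx
    rw [List.mem_range] at hx
    have hlt : 1 + 4 * x < cs.length := by omega
    have hidx : (min 1 (cs.length : Int) + 4 * (x : Int)).toNat = 1 + 4 * x := by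
      rw [hmin]; omega
    simp [hidx, List.getElem?_eq_getElem hlt]
  · rw [if_neg (by omega)]
    have h2 : (cs.length + 2) / 4 = 0 := by omega
    simp [h2]

-- the loop body of A, as a map over List.range
lemma crates_A_eq (cs : List Char) (m : Nat) :
    (PySem.List.pyRange 0 (m : Int)).foldl (fun crates i =>
      if ((cs.length : Int)) > 1 + 4 * i then
        crates ++ [(PySem.List.pyGet? cs (1 + 4 * i)).getD ' ']
      else
        crates ++ [' ']) [] =
    (List.range m).map (fun i => if 1 + 4 * i < cs.length then cs.getD (1 + 4 * i) ' ' else ' ') := by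
  have hf : (fun (crates : List Char) (i : Int) =>
      if ((cs.length : Int)) > 1 + 4 * i then
        crates ++ [(PySem.List.pyGet? cs (1 + 4 * i)).getD ' ']
      else
        crates ++ [' ']) =
      (fun crates i => crates ++ [if ((cs.length : Int)) > 1 + 4 * i then
        (PySem.List.pyGet? cs (1 + 4 * i)).getD ' ' else ' ']) := by
    funext a i; split <;> rfl
  rw [hf, PySem.List.foldl_append_singleton_eq_map, PySem.List.pyRange_zero_natCast,
    List.map_map, List.nil_append]
  apply List.map_congr_left
  intro i hi
  simp only [Function.comp_apply]
  have hcast : (1 : Int) + 4 * (i : Int) = ((1 + 4 * i : Nat) : Int) := by push_cast; ring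
  by_cases hlt : 1 + 4 * i < cs.length
  · rw [if_pos hlt, if_pos (show ((cs.length : Int)) > 1 + 4 * (i : Int) by omega)]
    rw [hcast, PySem.List.pyGet?_natCast]
    simp [List.getD]
  · rw [if_neg hlt, if_neg (show ¬(((cs.length : Int)) > 1 + 4 * (i : Int)) by omega)]

-- B's slice-truncate-pad equals A's per-index map
lemma core_eq (cs : List Char) (m : Nat) :
    (PySem.List.slice ((List.range ((cs.length + 2) / 4)).map (fun k => cs.getD (1 + 4 * k) ' '))
        none (some (m : Int))) ++
      List.replicate (m - (PySem.List.slice ((List.range ((cs.length + 2) / 4)).map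
        (fun k => cs.getD (1 + 4 * k) ' ')) none (some (m : Int))).length) ' ' =
    (List.range m).map (fun i => if 1 + 4 * i < cs.length then cs.getD (1 + 4 * i) ' ' else ' ') := by
  rw [PySem.List.slice_to_natCast]
  set cnt := (cs.length + 2) / 4 with hcnt
  apply List.ext_getElem
  · simp
  · intro i h1 h2
    simp only [List.length_append, List.length_take, List.length_map, List.length_range,
      List.length_replicate] at h1 h2 ⊢
    by_cases hi : i < min m cnt
    · rw [List.getElem_append_left (by simp; omega)]
      rw [List.getElem_take, List.getElem_map, List.getElem_range]
      rw [List.getElem_map, List.getElem_range]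
      rw [if_pos (by omega)]
    · rw [List.getElem_append_right (by simp; omega)]
      rw [List.getElem_replicate]
      rw [List.getElem_map, List.getElem_range]
      rw [if_neg (by omega)]

-- ===== VERDICT (by name: the statement is the Claim_ definition above) =====
theorem get_crates_in_line_spec : Claim_equal_get_crates_in_line := by
  intro line n _ hpre
  unfold Spec_get_crates_in_line get_crates_in_line get_crates_in_line_alt
  by_cases hn : 0 ≤ n
  case neg =>
    -- negative count admitted by Pre_: both sides are the empty string
    have hneg : n < 0 := by omega
    have hcov : ((line.toList.length : Int) + 2) / 4 ≤ -n := by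
      rcases hpre with h | h
      · omega
      · exact h
    have hA : PySem.List.pyRange 0 n = [] := by
      simp [PySem.List.pyRange]; omega
    rw [hA]
    simp only [List.foldl_nil, strided_eq line.toList]
    have hslice : PySem.List.slice
        ((List.range ((line.toList.length + 2) / 4)).map (fun k => line.toList.getD (1 + 4 * k) ' '))
        none (some n) = [] := by
      have hn' : n = -((((-n).toNat : Nat)) : Int) := by omega
      rw [hn', PySem.List.slice_to_neg_natCast _ (-n).toNat (by omega)]
      have hl : line.toList.length = line.length := by simp
      simp
      omega
    rw [hslice]
    have h0 : n.toNat = 0 := by omega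
    simp [h0, PySem.Str.replace]
  obtain ⟨m, rfl⟩ : ∃ m : Nat, n = (m : Int) :=
    ⟨n.toNat, (Int.toNat_of_nonneg hn).symm⟩
  simp only [strided_eq line.toList]
  rw [Int.toNat_natCast]
  rw [core_eq line.toList m]
  have hA : (PySem.Str.len line) = ((line.toList.length : Int)) := by
    simp [PySem.Str.len]
  have hG : ∀ i : Int, PySem.Str.pyGet? line i = PySem.List.pyGet? line.toList i := by
    intro i; simp [PySem.Str.pyGet?]
  simp only [hA, hG]
  rw [crates_A_eq line.toList m]
  simp [PySem.Str.replace]
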